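-- pv_equiv track=rewrite | github.com/Cristian-Wigand/TLL_1_INFO1148_Cristian_Wigand | codigo.py | seleccionar_segmento
-- ===== SOURCE A (Python) =====
-- def limpiar_prefijo(linea: str):
--     """
--     Si la línea tiene un prefijo tipo 'entrada15; ...', se elimina y se
--     devuelve solo lo de la derecha del ';'.
--     """
--     if ";" in linea:
--         _, derecha = linea.split(";", 1)
--         return derecha.strip()
--     return linea
--
-- def seleccionar_segmento(lineas, opcion):
--     """
--     Devuelve un subconjunto de las líneas según la opción:
--     - 'primeras': primeras 10
--     - 'ultimas': últimas 10
--     - 'todo': todas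
--     Cada elemento es una tupla (numero_linea, linea_cruda, linea_limpia).
--     """
--     n = len(lineas)
--     if opcion == "primeras":
--         indices = range(0, min(10, n))
--     elif opcion == "ultimas":
--         indices = range(max(0, n - 10), n)
--     else:
--         indices = range(0, n)
--
--     seleccion = []
--     for i in indices:
--         cruda = lineas[i]
--         limpia = limpiar_prefijo(cruda)
--         seleccion.append((i + 1, cruda, limpia))  # numeración desde 1
--     return seleccion
-- ===== SOURCE B (Python) =====
-- def limpiar_prefijo(linea: str):
--     if ";" in linea:
--         _, derecha = linea.split(";", 1)
--         return derecha.strip()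
--     return linea
--
-- def seleccionar_segmento(lineas, opcion):
--     # Annotate every line once, then select by slicing.
--     todas = [(i + 1, cruda, limpiar_prefijo(cruda)) for i, cruda in enumerate(lineas)]
--     if opcion == "primeras":
--         return todas[:10]
--     if opcion == "ultimas":
--         return todas[-10:]
--     return todas
-- ===== Notes on version B (the rewrite author's own statement) =====
-- stated objective: simpler
-- what changed: B annotates all lines once with enumerate and then selects the segment with native list slicing (todas[:10] / todas[-10:]), instead of A's computing an index range first and looping over indices with explicit indexing.
import Mathlib
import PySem

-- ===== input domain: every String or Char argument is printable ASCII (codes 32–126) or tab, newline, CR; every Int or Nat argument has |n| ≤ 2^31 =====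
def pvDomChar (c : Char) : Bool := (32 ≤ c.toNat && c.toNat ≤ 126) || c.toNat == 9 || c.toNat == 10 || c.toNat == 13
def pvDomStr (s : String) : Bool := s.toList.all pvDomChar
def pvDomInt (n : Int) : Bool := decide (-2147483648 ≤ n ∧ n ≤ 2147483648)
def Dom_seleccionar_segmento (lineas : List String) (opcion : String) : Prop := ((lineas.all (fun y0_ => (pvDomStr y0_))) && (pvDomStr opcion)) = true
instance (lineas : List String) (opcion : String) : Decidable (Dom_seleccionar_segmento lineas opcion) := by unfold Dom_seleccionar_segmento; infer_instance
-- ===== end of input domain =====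

-- B changes the decomposition: annotate every line once, then slice the segment (objective: simpler).

-- ===== PORT A =====
-- shared module helper limpiar_prefijo
def limpiar_prefijo (linea : String) : String :=
  if PySem.Str.isIn ";" linea then
    -- linea.split(";", 1) = [left, right] here; take the right part and strip it
    match PySem.Str.splitMax? linea ";" 1 with
    | some (_ :: derecha :: _) => PySem.Str.strip derecha
    | _ => linea  -- unreachable: ";" occurs in linea
  else linea

def seleccionar_segmento (lineas : List String) (opcion : String) : List (Int × String × String) :=
  let n : Int := lineas.length
  let indices :=
    if opcion == "primeras" then PySem.List.pyRange 0 (min 10 n) 1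
    else if opcion == "ultimas" then PySem.List.pyRange (max 0 (n - 10)) n 1
    else PySem.List.pyRange 0 n 1
  indices.foldl (fun seleccion i =>
    -- index i is always in range here, so the default "" is never used
    let cruda := PySem.List.pyGetD lineas i ""
    let limpia := limpiar_prefijo cruda
    seleccion ++ [(i + 1, cruda, limpia)]) []

-- ===== PORT B =====
def seleccionar_segmento_alt (lineas : List String) (opcion : String) : List (Int × String × String) :=
  let todas := (PySem.List.enumerate lineas 0).map (fun p => (p.1 + 1, p.2, limpiar_prefijo p.2))
  if opcion == "primeras" then PySem.List.slice todas none (some 10)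
  else if opcion == "ultimas" then PySem.List.slice todas (some (-10)) none
  else todas

-- ===== PRECONDITION & SPEC =====
def Spec_seleccionar_segmento (lineas : List String) (opcion : String) (out : List (Int × String × String)) : Prop := out = seleccionar_segmento_alt lineas opcion
instance (lineas : List String) (opcion : String) (out : List (Int × String × String)) : Decidable (Spec_seleccionar_segmento lineas opcion out) := by unfold Spec_seleccionar_segmento; infer_instance

-- ===== CLAIM (what is proved, stated in full; the proofs are below) =====
def Claim_equal_seleccionar_segmento : Prop := ∀ (lineas : List String) (opcion : String), Dom_seleccionar_segmento lineas opcion → Spec_seleccionar_segmento lineas opcion (seleccionar_segmento lineas opcion)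

-- ===== LEMMAS AND PROOFS =====

def pvMapped (lineas : List String) : List (Int × String × String) :=
  (PySem.List.enumerate lineas 0).map (fun p => (p.1 + 1, p.2, limpiar_prefijo p.2))

theorem pvEnum_length {α : Type} (xs : List α) (s : Int) :
    (PySem.List.enumerate xs s).length = xs.length := by
  induction xs generalizing s with
  | nil => simp [PySem.List.enumerate_nil]
  | cons x xs ih => simp [PySem.List.enumerate_cons, ih]

theorem pvEnum_getElem {α : Type} (xs : List α) (s : Int) (i : Nat) (h : i < xs.length)
    (h' : i < (PySem.List.enumerate xs s).length) :
    (PySem.List.enumerate xs s)[i] = (s + i, xs[i]) := by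
  induction xs generalizing s i with
  | nil => simp at h
  | cons x xs ih =>
    cases i with
    | zero => simp [PySem.List.enumerate_cons]
    | succ j =>
      have hj : j < xs.length := by simpa using h
      have hj' : j < (PySem.List.enumerate xs (s + 1)).length := by
        rw [pvEnum_length]; exact hj
      simp only [PySem.List.enumerate_cons, List.getElem_cons_succ, ih (s+1) j hj hj']
      refine Prod.ext ?_ rfl
      push_cast; ring

theorem pvMapped_length (lineas : List String) : (pvMapped lineas).length = lineas.length := by
  simp [pvMapped]

theorem pvMapped_getElem (lineas : List String) (i : Nat) (h : i < lineas.length)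
    (h' : i < (pvMapped lineas).length) :
    (pvMapped lineas)[i] = ((i : Int) + 1, lineas[i], limpiar_prefijo lineas[i]) := by
  have he : i < (PySem.List.enumerate lineas 0).length := by rw [pvEnum_length]; exact h
  simp [pvMapped, pvEnum_getElem lineas 0 i h he]

-- A's loop over an index range equals a drop/take window of the fully annotated list.
theorem pvLoopA (lineas : List String) (b : Nat) (hb : b ≤ lineas.length) :
    ∀ (k a : Nat), b - a = k → ∀ (acc : List (Int × String × String)),
      (PySem.List.pyRange (a : Int) (b : Int) 1).foldl
        (fun seleccion i =>
          seleccion ++ [(i + 1, PySem.List.pyGetD lineas i "",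
            limpiar_prefijo (PySem.List.pyGetD lineas i ""))]) acc
      = acc ++ ((pvMapped lineas).take b).drop a := by
  intro k
  induction k with
  | zero =>
    intro a hk acc
    have hba : (b : Int) ≤ (a : Int) := by exact_mod_cast Nat.le_of_sub_eq_zero hk
    rw [PySem.List.pyRange_one_eq_nil hba]
    have : (((pvMapped lineas).take b).drop a) = [] := by
      apply List.drop_eq_nil_of_le
      have := List.length_take_le b (pvMapped lineas)
      omega
    simp [this]
  | succ k ih =>
    intro a hk acc
    have hab : (a : Int) < (b : Int) := by exact_mod_cast (by omega : a < b)
    rw [PySem.List.pyRange_one_cons hab]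
    simp only [List.foldl_cons]
    have hcast : ((a : Int) + 1) = ((a + 1 : Nat) : Int) := by push_cast; ring
    rw [hcast, ih (a + 1) (by omega)]
    have ha : a < lineas.length := by omega
    have hat : a < ((pvMapped lineas).take b).length := by
      rw [List.length_take]; rw [pvMapped_length]; omega
    have hget : PySem.List.pyGetD lineas (a : Int) "" = lineas[a] := by
      simp [PySem.List.pyGetD_natCast, List.getElem?_eq_getElem ha]
    rw [List.append_assoc]
    congr 1
    have hdrop := List.drop_eq_getElem_cons hat
    rw [hdrop]
    have : ((pvMapped lineas).take b)[a] = (pvMapped lineas)[a]'(by rw [pvMapped_length]; omega) :=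
      List.getElem_take
    rw [this, pvMapped_getElem lineas a ha (by rw [pvMapped_length]; omega), hget]
    rfl

-- ===== VERDICT (by name: the statement is the Claim_ definition above) =====
theorem seleccionar_segmento_spec : Claim_equal_seleccionar_segmento := by
  intro lineas opcion _
  show seleccionar_segmento lineas opcion = seleccionar_segmento_alt lineas opcion
  simp only [seleccionar_segmento, seleccionar_segmento_alt]
  have hlen : (pvMapped lineas).length = lineas.length := pvMapped_length lineas
  by_cases h1 : opcion == "primeras"
  · rw [if_pos h1, if_pos h1]
    have hmin : (min 10 (lineas.length : Int)) = ((min 10 lineas.length : Nat) : Int) := by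
      push_cast; omega
    have hlp := pvLoopA lineas (min 10 lineas.length) (by omega) (min 10 lineas.length) 0 rfl []
    rw [Nat.cast_zero] at hlp
    rw [hmin, hlp, PySem.List.slice_to _ (by norm_num : (0:Int) ≤ 10)]
    simp only [List.nil_append, List.drop_zero]
    show ((pvMapped lineas).take (min 10 lineas.length)) = (pvMapped lineas).take (10:Int).toNat
    by_cases h : 10 ≤ lineas.length
    · rw [Nat.min_eq_left h]; rfl
    · rw [Nat.min_eq_right (by omega)]
      rw [List.take_of_length_le (by omega), List.take_of_length_le (by rw [hlen]; norm_num; omega)]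
  · rw [if_neg h1, if_neg h1]
    by_cases h2 : opcion == "ultimas"
    · rw [if_pos h2, if_pos h2]
      have hmax : (max 0 ((lineas.length : Int) - 10)) = ((lineas.length - 10 : Nat) : Int) := by
        push_cast; omega
      rw [hmax, pvLoopA lineas lineas.length le_rfl _ (lineas.length - 10) rfl []]
      rw [PySem.List.slice_from_neg_ofNat _ 10 (by norm_num)]
      show [] ++ ((pvMapped lineas).take lineas.length).drop (lineas.length - 10)
          = (pvMapped lineas).drop ((pvMapped lineas).length - 10)
      rw [List.nil_append, hlen, List.take_of_length_le (le_of_eq hlen)]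
    · rw [if_neg h2, if_neg h2]
      have hlp := pvLoopA lineas lineas.length le_rfl _ 0 rfl []
      rw [Nat.cast_zero] at hlp
      rw [hlp]
      show [] ++ ((pvMapped lineas).take lineas.length).drop 0 = pvMapped lineas
      rw [List.nil_append, List.drop_zero, List.take_of_length_le (le_of_eq hlen)]
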